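-- pv_equiv track=rewrite | github.com/jradbayrem/PuzzlePolyformSolver- | Algorithme de resolution Final.py | rechercherZeroLigne
-- ===== SOURCE A (Python) =====
-- def rechercherZeroLigne(M):
--     ## M Matrice
--     Zlist=[] # liste contenant le nombre de zero à l'ext de chaque colonne
--     nbZL=0 # nombre de zero par Colonne
--     for i in range(len(M)):
--
--          nbZL=0
--          for j in range(len(M[0])-1,-1,-1):
--              if (M[i][j]==48):
--                  nbZL=nbZL+1
--
--
--              else :
--                  Zlist.append(nbZL)
--                  break
--     Zlist.sort()
--     return Zlist[0]
-- ===== SOURCE B (Python) =====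
-- def rechercherZeroLigne(M):
--     # One forward pass per row with a resetting counter, then min() -- no sort.
--     ncols = len(M[0])
--     counts = []
--     for row in M:
--         cnt = 0
--         for j in range(ncols):
--             cnt = cnt + 1 if row[j] == 48 else 0
--         counts.append(cnt)
--     return min(counts)
-- ===== Notes on version B (the rewrite author's own statement) =====
-- stated objective: simpler
-- what changed: B replaces A's backward indexed scan with break by a forward resetting-counter pass over the column indices, and replaces sort-then-take-first by min(); all-zero rows contribute the full width, which never changes the minimum.
import Mathlib
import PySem

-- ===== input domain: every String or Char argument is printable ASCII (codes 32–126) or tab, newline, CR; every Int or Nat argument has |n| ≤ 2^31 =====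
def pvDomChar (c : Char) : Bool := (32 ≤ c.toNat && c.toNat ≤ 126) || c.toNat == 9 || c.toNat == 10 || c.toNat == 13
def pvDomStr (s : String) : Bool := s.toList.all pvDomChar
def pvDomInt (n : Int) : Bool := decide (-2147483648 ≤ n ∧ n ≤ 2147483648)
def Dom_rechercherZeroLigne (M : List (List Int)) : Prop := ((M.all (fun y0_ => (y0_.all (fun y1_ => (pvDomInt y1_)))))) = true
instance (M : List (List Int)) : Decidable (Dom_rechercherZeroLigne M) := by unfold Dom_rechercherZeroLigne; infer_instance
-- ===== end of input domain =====

-- B replaces A's backward indexed scan with break by a forward resetting-counter pass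
-- over the column indices, and sort-then-[0] by min(); equivalence is about the return value.

-- ===== PORT A =====
-- A's inner loop: for j in range(len(M[0])-1,-1,-1): count 48s, on a non-48 append and break.
-- pyGet? = none is Python's IndexError (excluded by Pre_); the port returns Z there.
def pvLoopA (row : List Int) (idxs : List Int) (nb : Int) (Z : List Int) : List Int :=
  match idxs with
  | [] => Z
  | j :: rest =>
    match PySem.List.pyGet? row j with
    | none => Z
    | some v => if v = 48 then pvLoopA row rest (nb + 1) Z else Z ++ [nb]

def rechercherZeroLigne (M : List (List Int)) : Int :=
  let w : Int := ((PySem.List.pyGet? M 0).getD []).length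
  let Zlist := M.foldl (fun Z row => pvLoopA row (PySem.List.pyRange (w - 1) (-1) (-1)) 0 Z) []
  (PySem.List.pyGet? (PySem.List.sorted Zlist (fun x => x) false) 0).getD 0

-- ===== PORT B =====
-- forward pass over columns 0..ncols-1 with a resetting counter, then min
-- (pyGetD is row[j]; j is in range under Pre_, where B's Python returns)
def rechercherZeroLigne_alt (M : List (List Int)) : Int :=
  let ncols : Int := ((PySem.List.pyGet? M 0).getD []).length
  let counts := M.foldl (fun acc row =>
      let cnt := (PySem.List.pyRange 0 ncols 1).foldl
        (fun cnt j => if PySem.List.pyGetD row j 0 = 48 then cnt + 1 else 0) (0 : Int)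
      acc ++ [cnt]) []
  (PySem.List.min? counts (fun x => x)).getD 0

-- ===== PRECONDITION & SPEC =====
-- Pre_ is exactly A's return domain: M nonempty, every row at least as long as the first
-- (A indexes M[i][len(M[0])-1] first, so a shorter row raises IndexError), and some row
-- has a non-48 entry among its first len(M[0]) elements (else Zlist is empty and
-- Zlist[0] raises IndexError).
def Pre_rechercherZeroLigne (M : List (List Int)) : Prop :=
  M ≠ [] ∧ (∀ row ∈ M, (M.headD []).length ≤ row.length) ∧
    (∃ row ∈ M, (row.take (M.headD []).length).any (fun v => decide (v ≠ 48)) = true)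
instance (M : List (List Int)) : Decidable (Pre_rechercherZeroLigne M) := by
  unfold Pre_rechercherZeroLigne; infer_instance
def pvWitness_rechercherZeroLigne : List (List Int) := [[48, 1, 48]]

def Spec_rechercherZeroLigne (M : List (List Int)) (out : Int) : Prop := out = rechercherZeroLigne_alt M
instance (M : List (List Int)) (out : Int) : Decidable (Spec_rechercherZeroLigne M out) := by unfold Spec_rechercherZeroLigne; infer_instance

-- ===== CLAIM (what is proved, stated in full; the proofs are below) =====
def Claim_equal_rechercherZeroLigne : Prop := ∀ (M : List (List Int)), Dom_rechercherZeroLigne M → Pre_rechercherZeroLigne M → Spec_rechercherZeroLigne M (rechercherZeroLigne M)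

-- ===== LEMMAS AND PROOFS =====

-- trailing-48 count of p, read off the reversed list
def pvTz : List Int → Int
  | [] => 0
  | v :: r => if v = 48 then 1 + pvTz r else 0

theorem pvTz_le_length (p : List Int) : pvTz p ≤ (p.length : Int) := by
  induction p with
  | nil => simp [pvTz]
  | cons v r ih =>
    simp only [pvTz, List.length_cons]
    split <;> push_cast <;> omega

-- B's inner loop over range(ncols): resetting counter
theorem pvRowB_eq (row : List Int) (w : Nat) (hw : w ≤ row.length) :
    (PySem.List.pyRange 0 (w : Int) 1).foldl
        (fun cnt j => if PySem.List.pyGetD row j 0 = 48 then cnt + 1 else 0) (0 : Int) =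
      if (row.take w).any (fun v => decide (v ≠ 48)) then pvTz (row.take w).reverse
      else (w : Int) := by
  induction w with
  | zero => simp [PySem.List.pyRange_one_eq_nil]
  | succ w ih =>
    have hwl : w < row.length := by omega
    have hcast : ((w + 1 : Nat) : Int) = ((w : Nat) : Int) + 1 := by push_cast; ring
    rw [hcast, PySem.List.pyRange_one_succ_right (by positivity), List.foldl_append,
      ih (by omega)]
    have htake : row.take (w + 1) = row.take w ++ [row[w]] := by
      rw [List.take_add_one, List.getElem?_eq_getElem hwl]; rfl
    have hget : PySem.List.pyGetD row ((w : Nat) : Int) 0 = row[w] := by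
      rw [PySem.List.pyGetD_natCast]
      exact List.getD_eq_getElem row 0 hwl
    rw [htake]
    simp only [List.foldl_cons, List.foldl_nil, hget]
    by_cases hv : row[w] = 48
    · have hQ : (row.take w ++ [row[w]]).any (fun v => decide (v ≠ 48)) =
          (row.take w).any (fun v => decide (v ≠ 48)) := by simp [hv]
      have htz : pvTz ((row.take w ++ [row[w]]).reverse) = 1 + pvTz (row.take w).reverse := by
        rw [List.reverse_append]; simp [pvTz, hv]
      rw [hQ]
      by_cases hp : (row.take w).any (fun v => decide (v ≠ 48))
      · rw [if_pos hp, if_pos hp, if_pos hv, htz]; ring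
      · rw [if_neg hp, if_neg hp, if_pos hv]
    · have hQ : (row.take w ++ [row[w]]).any (fun v => decide (v ≠ 48)) = true := by
        simp only [List.any_append, List.any_cons, List.any_nil, Bool.or_false,
          Bool.or_eq_true, decide_eq_true_eq]
        right; exact hv
      have htz : pvTz ((row.take w ++ [row[w]]).reverse) = 0 := by
        rw [List.reverse_append]; simp [pvTz, hv]
      rw [if_pos hQ, if_neg hv, htz]

theorem pvLoopA_cons_some (row : List Int) (rest : List Int) (j : Int) (v nb : Int)
    (Z : List Int) (h : PySem.List.pyGet? row j = some v) :
    pvLoopA row (j :: rest) nb Z =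
      if v = 48 then pvLoopA row rest (nb + 1) Z else Z ++ [nb] := by
  conv_lhs => rw [pvLoopA]
  rw [h]

theorem pvLoopA_eq (row : List Int) (w : Nat) (hw : w ≤ row.length) (nb : Int) (Z : List Int) :
    pvLoopA row (PySem.List.pyRange ((w : Int) - 1) (-1) (-1)) nb Z =
      if (row.take w).any (fun v => decide (v ≠ 48)) then Z ++ [nb + pvTz (row.take w).reverse]
      else Z := by
  induction w generalizing nb with
  | zero =>
    rw [PySem.List.pyRange_neg_one_eq_nil (by omega)]
    simp [pvLoopA]
  | succ w ih =>
    have hlt : (-1 : Int) < ((w + 1 : Nat) : Int) - 1 := by push_cast; omega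
    have hcast : ((w + 1 : Nat) : Int) - 1 = ((w : Nat) : Int) := by push_cast; ring
    rw [hcast] at hlt ⊢
    rw [PySem.List.pyRange_neg_one_cons hlt]
    have hwl : w < row.length := by omega
    rw [pvLoopA_cons_some row _ _ row[w] nb Z
      (by rw [PySem.List.pyGet?_natCast, List.getElem?_eq_getElem hwl])]
    have htake : row.take (w + 1) = row.take w ++ [row[w]] := by
      rw [List.take_add_one, List.getElem?_eq_getElem hwl]; rfl
    rw [htake]
    by_cases hv : row[w] = 48
    · rw [if_pos hv, ih (by omega)]
      have hQ : (row.take w ++ [row[w]]).any (fun v => decide (v ≠ 48)) =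
          (row.take w).any (fun v => decide (v ≠ 48)) := by simp [hv]
      rw [hQ]
      have htz : pvTz ((row.take w ++ [row[w]]).reverse) = 1 + pvTz (row.take w).reverse := by
        rw [List.reverse_append]
        simp [pvTz, hv]
      by_cases hp : (row.take w).any (fun v => decide (v ≠ 48))
      · rw [if_pos hp, if_pos hp, htz]
        simp only [List.append_cancel_left_eq, List.cons.injEq, and_true]
        omega
      · rw [if_neg hp, if_neg hp]
    · rw [if_neg hv]
      have hQ : (row.take w ++ [row[w]]).any (fun v => decide (v ≠ 48)) = true := by
        simp only [List.any_append, List.any_cons, List.any_nil, Bool.or_false,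
          Bool.or_eq_true, decide_eq_true_eq]
        right
        exact hv
      rw [if_pos hQ]
      have htz : pvTz ((row.take w ++ [row[w]]).reverse) = 0 := by
        rw [List.reverse_append]
        simp [pvTz, hv]
      rw [htz]
      simp

-- A's fold builds the tz-values of the rows that have a non-48 in their first w columns
theorem pv_foldA_eq (w : Nat) (L : List (List Int)) (hL : ∀ row ∈ L, w ≤ row.length)
    (Z : List Int) :
    L.foldl (fun Z row => pvLoopA row (PySem.List.pyRange ((w : Int) - 1) (-1) (-1)) 0 Z) Z =
      Z ++ (L.filter (fun row => (row.take w).any (fun v => decide (v ≠ 48)))).map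
        (fun row => pvTz (row.take w).reverse) := by
  induction L generalizing Z with
  | nil => simp
  | cons row L ih =>
    simp only [List.foldl_cons, List.filter_cons]
    rw [pvLoopA_eq row w (hL row (List.mem_cons_self ..)) 0 Z]
    by_cases hp : (row.take w).any (fun v => decide (v ≠ 48))
    · rw [if_pos hp, if_pos hp, ih (fun r hr => hL r (List.mem_cons_of_mem _ hr))]
      simp
    · rw [if_neg hp, if_neg (by simpa using hp), ih (fun r hr => hL r (List.mem_cons_of_mem _ hr))]

-- B's fold builds the resetting-counter value of every row
theorem pv_foldB_eq (w : Nat) (L : List (List Int)) (hL : ∀ row ∈ L, w ≤ row.length)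
    (Z : List Int) :
    L.foldl (fun acc row =>
        acc ++ [(PySem.List.pyRange 0 (w : Int) 1).foldl
          (fun cnt j => if PySem.List.pyGetD row j 0 = 48 then cnt + 1 else 0) (0 : Int)]) Z =
      Z ++ L.map (fun row =>
        if (row.take w).any (fun v => decide (v ≠ 48)) then pvTz (row.take w).reverse
        else (w : Int)) := by
  induction L generalizing Z with
  | nil => simp
  | cons row L ih =>
    simp only [List.foldl_cons, List.map_cons]
    rw [pvRowB_eq row w (hL row (List.mem_cons_self ..)),
      ih (fun r hr => hL r (List.mem_cons_of_mem _ hr))]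
    simp

-- head of sorted = min (first minimum; values over Int, so equal values are equal)
theorem pv_sorted_head_min (C : List Int) (hC : C ≠ []) :
    (PySem.List.pyGet? (PySem.List.sorted C (fun x => x) false) 0).getD 0 =
      (PySem.List.min? C (fun x => x)).getD 0 := by
  obtain ⟨m, t, hs⟩ : ∃ m t, PySem.List.sorted C (fun x => x) false = m :: t := by
    cases hsor : PySem.List.sorted C (fun x => x) false with
    | nil =>
      exfalso
      have := PySem.List.sorted_perm C (fun x => x) false
      rw [hsor] at this
      exact hC (List.Perm.nil_eq this).symm
    | cons m t => exact ⟨m, t, rfl⟩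
  obtain ⟨m', hm'⟩ : ∃ m', PySem.List.min? C (fun x => x) = some m' := by
    cases hmin : PySem.List.min? C (fun x => x) with
    | none => exact absurd ((PySem.List.min?_eq_none_iff C (fun x => x)).mp hmin) hC
    | some m' => exact ⟨m', rfl⟩
  rw [hs, hm']
  simp only [PySem.List.pyGet?_zero, List.getElem?_cons_zero, Option.getD_some]
  have hmem : m ∈ C := by
    have := PySem.List.sorted_perm C (fun x => x) false
    rw [hs] at this
    exact this.mem_iff.mp (List.mem_cons_self ..)
  have hmem' : m' ∈ C := PySem.List.min?_mem hm'
  have h1 : m ≤ m' := PySem.List.key_head_sorted_le C (fun x => x) hs m' hmem'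
  have h2 : m' ≤ m := PySem.List.min?_isMin hm' m hmem
  omega

-- the two minima agree: ZL ⊆ CL, CL \ ZL is only copies of w, and every element of ZL is ≤ w
theorem pv_min_eq (w : Int) (ZL CL : List Int) (hne : ZL ≠ [])
    (hsub : ∀ x ∈ ZL, x ∈ CL) (hsup : ∀ x ∈ CL, x ∈ ZL ∨ x = w)
    (hle : ∀ x ∈ ZL, x ≤ w) :
    (PySem.List.min? ZL (fun x => x)).getD 0 = (PySem.List.min? CL (fun x => x)).getD 0 := by
  obtain ⟨z, t, rfl⟩ := List.exists_cons_of_ne_nil hne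
  obtain ⟨m, hm⟩ : ∃ m, PySem.List.min? (z :: t) (fun x => x) = some m := by
    cases hmin : PySem.List.min? (z :: t) (fun x => x) with
    | none => exact absurd ((PySem.List.min?_eq_none_iff _ (fun x => x)).mp hmin) (by simp)
    | some m => exact ⟨m, rfl⟩
  have hCne : CL ≠ [] := by
    intro h
    exact absurd (hsub z (List.mem_cons_self ..)) (by simp [h])
  obtain ⟨m', hm'⟩ : ∃ m', PySem.List.min? CL (fun x => x) = some m' := by
    cases hmin : PySem.List.min? CL (fun x => x) with
    | none => exact absurd ((PySem.List.min?_eq_none_iff _ (fun x => x)).mp hmin) hCne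
    | some m' => exact ⟨m', rfl⟩
  rw [hm, hm']
  have hmmem : m ∈ z :: t := PySem.List.min?_mem hm
  have h1 : m' ≤ m := PySem.List.min?_isMin hm' m (hsub m hmmem)
  have h2 : m ≤ m' := by
    rcases hsup m' (PySem.List.min?_mem hm') with h | rfl
    · exact PySem.List.min?_isMin hm m' h
    · exact hle m hmmem
  simp
  omega

-- ===== VERDICT (by name: the statement is the Claim_ definition above) =====
theorem rechercherZeroLigne_spec : Claim_equal_rechercherZeroLigne := by
  intro M _ hPre
  obtain ⟨hne, hlen, hex⟩ := hPre
  unfold Spec_rechercherZeroLigne rechercherZeroLigne rechercherZeroLigne_alt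
  obtain ⟨r0, rest, rfl⟩ := List.exists_cons_of_ne_nil hne
  have hw : ((PySem.List.pyGet? (r0 :: rest) 0).getD []).length = (r0.length : Int) := by
    simp
  simp only [hw]
  have hlen' : ∀ row ∈ r0 :: rest, r0.length ≤ row.length := by simpa using hlen
  have hcast : ((r0.length : Int)) = ((r0.length : Nat) : Int) := rfl
  rw [hcast, pv_foldA_eq r0.length (r0 :: rest) hlen' [], pv_foldB_eq r0.length (r0 :: rest) hlen' []]
  simp only [List.nil_append]
  simp only [List.headD_cons] at hex
  obtain ⟨r, hr, hany⟩ := hex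
  have hZne : ((r0 :: rest).filter (fun row => (row.take r0.length).any
        (fun v => decide (v ≠ 48)))).map (fun row => pvTz (row.take r0.length).reverse) ≠ [] := by
    have hmem : r ∈ (r0 :: rest).filter (fun row => (row.take r0.length).any
        (fun v => decide (v ≠ 48))) := List.mem_filter.mpr ⟨hr, hany⟩
    simp only [ne_eq, List.map_eq_nil_iff]
    exact List.ne_nil_of_mem hmem
  rw [pv_sorted_head_min _ hZne]
  apply pv_min_eq (r0.length : Int) _ _ hZne
  · intro x hx
    obtain ⟨s, hs, rfl⟩ := List.mem_map.mp hx
    have hs' := List.mem_filter.mp hs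
    exact List.mem_map.mpr ⟨s, hs'.1, by rw [if_pos hs'.2]⟩
  · intro x hx
    obtain ⟨s, hs, rfl⟩ := List.mem_map.mp hx
    by_cases hp : (s.take r0.length).any (fun v => decide (v ≠ 48))
    · left
      exact List.mem_map.mpr ⟨s, List.mem_filter.mpr ⟨hs, hp⟩, by rw [if_pos hp]⟩
    · right
      rw [if_neg hp]
  · intro x hx
    obtain ⟨s, hs, rfl⟩ := List.mem_map.mp hx
    calc pvTz (s.take r0.length).reverse ≤ ((s.take r0.length).reverse.length : Int) :=
          pvTz_le_length _
      _ ≤ (r0.length : Int) := by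
          simp only [List.length_reverse, List.length_take]
          exact_mod_cast Nat.min_le_left _ _
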